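-- pv_equiv track=rewrite | github.com/AndreFCruz/google-foobar | level-4_free-the-bunny-workers/solution.py | compute_IM_columns
-- ===== SOURCE A (Python) =====
-- import heapq
--
-- def compute_IM_columns(v, k):
--     """Compute the columns of the incidence matrix with the given parameters"""
--
--     columns = []
--     # As priority for our heap we are first using the number of 1s and
--     # then the idx. We use the negative on both values because the heap is
--     # ordered in ascending manner and we want the highest number of ones with
--     # highest idx to be processed first
--     stack = [(0, 0, [0] * v)]
--
--     while stack:
--         negative_sum_ones, negative_idx, current = heapq.heappop(stack)
--         idx = -negative_idx
--         sum_ones = -negative_sum_ones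
--
--         # Skip if it is not possible to get k 1s from the current idx
--         if idx > (v - k + sum_ones):
--             continue
--
--         # We are just copying the list but doing it in a python2 friendly way
--         current_1 = current[:]
--         current_1[idx] = 1
--
--         if sum_ones + 1 == k:
--             columns.append(current_1)
--         else:
--             heapq.heappush(stack, (negative_sum_ones - 1, -(idx + 1), current_1))
--
--         heapq.heappush(stack, (negative_sum_ones, -(idx + 1), current[:]))
--
--     return columns
-- ===== SOURCE B (Python) =====
-- def compute_IM_columns(v, k):
--     """Compute the columns of the incidence matrix with the given parameters"""
--     if k < 1 or k > v:
--         return []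
--     # table[m] = all ascending m-subsets of positions [p, v), in lexicographic
--     # order, built bottom-up by sweeping p from v-1 down to 0.
--     table = [[[]]] + [[] for _ in range(k)]
--     for p in reversed(range(v)):
--         table = [table[0]] + [[[p] + c for c in prev] + cur
--                               for prev, cur in zip(table, table[1:])]
--     cols = []
--     for comb in table[k]:
--         col = [0] * v
--         for p in comb:
--             col[p] = 1
--         cols.append(col)
--     return cols
-- ===== Notes on version B (the rewrite author's own statement) =====
-- stated objective: alternative
-- what changed: A explores a priority queue of partial columns (heapq of (-ones,-idx,column) tuples, copying a length-v list at every node); B builds the lexicographic k-combinations of positions bottom-up with one reverse sweep over positions maintaining a table of m-combination lists, then materialises each combination as a 0/1 column.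
import Mathlib
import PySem

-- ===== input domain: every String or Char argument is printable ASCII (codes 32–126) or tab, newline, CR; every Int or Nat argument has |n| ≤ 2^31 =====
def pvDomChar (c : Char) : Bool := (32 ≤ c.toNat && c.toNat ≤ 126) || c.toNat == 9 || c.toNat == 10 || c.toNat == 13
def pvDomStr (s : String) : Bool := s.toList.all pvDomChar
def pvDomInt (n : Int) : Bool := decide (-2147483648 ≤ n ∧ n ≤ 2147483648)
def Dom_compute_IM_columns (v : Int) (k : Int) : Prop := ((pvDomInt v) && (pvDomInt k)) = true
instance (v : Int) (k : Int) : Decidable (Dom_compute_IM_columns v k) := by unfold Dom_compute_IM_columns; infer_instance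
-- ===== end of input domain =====

-- B replaces A's heap-driven search over partial columns by a bottom-up table of
-- lexicographic position-combinations built in one reverse sweep (objective: alternative).

-- ===== PORT A =====
-- Python list comparison (lexicographic on Int), exact
def intListLt : List Int → List Int → Bool
  | _, [] => false
  | [], _ :: _ => true
  | a :: as, b :: bs => if a < b then true else if b < a then false else intListLt as bs

-- Python tuple comparison for the heap entries (negative_sum, negative_idx, list), exact
def ltT (x y : Int × Int × List Int) : Bool :=
  x.1 < y.1 || (x.1 == y.1 && (x.2.1 < y.2.1 || (x.2.1 == y.2.1 && intListLt x.2.2 y.2.2)))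

-- heapq modelled at the value level: the heap is the multiset of entries, heappop removes
-- a minimal entry (first minimal occurrence), heappush conses.  Exact for the values A
-- returns, since heappop always yields a minimum under the same total order ltT.
def popMin (x : Int × Int × List Int) (xs : List (Int × Int × List Int)) :
    (Int × Int × List Int) × List (Int × Int × List Int) :=
  match xs with
  | [] => (x, [])
  | y :: ys =>
    let m := popMin y ys
    if ltT m.1 x then (m.1, x :: m.2) else (x, y :: ys)

-- the while loop; fuel bounds the iteration count (3^(v+1)+1 suffices on Pre_, see proofs).
-- current_1[idx] = 1 is List.set (exact for 0 ≤ idx < len; A raises IndexError otherwise,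
-- which Pre_ excludes).
def loopA (v k : Int) : Nat → List (Int × Int × List Int) → List (List Int) → List (List Int)
  | 0, _, cols => cols
  | _ + 1, [], cols => cols
  | fuel + 1, x :: xs, cols =>
    let m := (popMin x xs).1
    let rest := (popMin x xs).2
    let idx := -m.2.1
    let s := -m.1
    if idx > v - k + s then loopA v k fuel rest cols
    else
      let cur1 := m.2.2.set idx.toNat 1
      if s + 1 = k then
        loopA v k fuel ((m.1, -(idx + 1), m.2.2) :: rest) (cols ++ [cur1])
      else
        loopA v k fuel ((m.1, -(idx + 1), m.2.2) :: (m.1 - 1, -(idx + 1), cur1) :: rest) cols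

def compute_IM_columns (v : Int) (k : Int) : List (List Int) :=
  loopA v k (3 ^ (v + 1).toNat + 1) [(0, 0, List.replicate v.toNat 0)] []

-- ===== PORT B =====
-- table[0] is List.take 1 (table is never empty: its length is k+1 ≥ 2 under the guard);
-- table[k] is pyGet? (always some under the guard, getD [] is never used).
def compute_IM_columns_alt (v : Int) (k : Int) : List (List Int) :=
  if k < 1 ∨ v < k then []
  else
    ((PySem.List.pyGet?
        (((PySem.List.pyRange 0 v 1).reverse).foldl
          (fun C p => C.take 1 ++ (C.zip C.tail).map (fun pc => pc.1.map (fun c => p :: c) ++ pc.2))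
          ([[([] : List Int)]] ++ List.replicate k.toNat []))
        k).getD []).map
      (fun comb => comb.foldl (fun col p => col.set p.toNat 1) (List.replicate v.toNat 0))

-- ===== PRECONDITION & SPEC =====
-- Pre_ excludes exactly the inputs on which A raises IndexError (k ≤ v with k ≤ 0 or v ≤ 0).
def Pre_compute_IM_columns (v : Int) (k : Int) : Prop := v < k ∨ (1 ≤ v ∧ 1 ≤ k)
instance (v : Int) (k : Int) : Decidable (Pre_compute_IM_columns v k) := by
  unfold Pre_compute_IM_columns; infer_instance

def pvWitness_compute_IM_columns : Int × Int := (3, 2)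

def Spec_compute_IM_columns (v : Int) (k : Int) (out : List (List Int)) : Prop :=
  out = compute_IM_columns_alt v k
instance (v : Int) (k : Int) (out : List (List Int)) : Decidable (Spec_compute_IM_columns v k out) := by
  unfold Spec_compute_IM_columns; infer_instance

-- ===== CLAIM (what is proved, stated in full; the proofs are below) =====
def Claim_equal_compute_IM_columns : Prop := ∀ (v : Int) (k : Int), Dom_compute_IM_columns v k → Pre_compute_IM_columns v k → Spec_compute_IM_columns v k (compute_IM_columns v k)


-- ===== LEMMAS AND PROOFS =====

-- order facts
lemma intListLt_asymm : ∀ (a b : List Int), intListLt a b = true → intListLt b a = false := by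
  intro a
  induction a with
  | nil => intro b h; cases b <;> simp_all [intListLt]
  | cons x xs ih =>
    intro b h
    cases b with
    | nil => simp_all [intListLt]
    | cons y ys =>
      simp only [intListLt] at h ⊢
      by_cases h1 : x < y
      · rw [if_neg (by omega), if_pos h1]
      · by_cases h2 : y < x
        · rw [if_neg h1, if_pos h2] at h
          exact absurd h (by simp)
        · rw [if_neg h1, if_neg h2] at h
          rw [if_neg h2, if_neg h1]
          exact ih ys h

lemma ltT_asymm (x y : Int × Int × List Int) (h : ltT x y = true) : ltT y x = false := by
  rw [Bool.eq_false_iff]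
  intro hyx
  simp only [ltT, Bool.or_eq_true, Bool.and_eq_true, beq_iff_eq, decide_eq_true_eq] at h hyx
  rcases h with h | ⟨e1, h⟩ <;> rcases hyx with g | ⟨f1, g⟩ <;> try omega
  rcases h with h | ⟨e2, h2⟩ <;> rcases g with g | ⟨f2, g2⟩ <;> try omega
  rw [intListLt_asymm _ _ h2] at g2
  exact absurd g2 (by simp)

-- strict order on the first two components only
def keyLt (x y : Int × Int × List Int) : Prop := x.1 < y.1 ∨ (x.1 = y.1 ∧ x.2.1 < y.2.1)

lemma keyLt_ltT (x y : Int × Int × List Int) (h : keyLt x y) : ltT x y = true := by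
  simp only [ltT, Bool.or_eq_true, Bool.and_eq_true, beq_iff_eq, decide_eq_true_eq]
  rcases h with h | ⟨h1, h2⟩
  · left; exact h
  · right; exact ⟨h1, Or.inl h2⟩

lemma popMin_mem (x : Int × Int × List Int) (xs : List (Int × Int × List Int)) :
    (popMin x xs).1 = x ∨ (popMin x xs).1 ∈ xs := by
  induction xs generalizing x with
  | nil => left; rfl
  | cons y ys ih =>
    simp only [popMin]
    split_ifs with h
    · rcases ih y with h' | h'
      · right; simp [h']
      · right; simp [h']
    · left; rfl

lemma popMin_min (x : Int × Int × List Int) (xs : List (Int × Int × List Int))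
    (h : ∀ y ∈ xs, ltT x y = true) : popMin x xs = (x, xs) := by
  cases xs with
  | nil => rfl
  | cons y ys =>
    simp only [popMin]
    have hmem := popMin_mem y ys
    have hlt : ltT x (popMin y ys).1 = true := by
      rcases hmem with h' | h'
      · rw [h']; exact h y (by simp)
      · exact h _ (by simp [h'])
    rw [ltT_asymm _ _ hlt]
    simp

lemma popMin_second (a b : Int × Int × List Int) (t : List (Int × Int × List Int))
    (hab : ltT a b = true) (ht : ∀ y ∈ t, ltT a y = true) :
    popMin b (a :: t) = (a, b :: t) := by
  simp only [popMin]
  rw [popMin_min a t ht]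
  simp [hab]

-- head-pop variant of the loop with the stack kept sorted
def loopB (v k : Int) : Nat → List (Int × Int × List Int) → List (List Int) → List (List Int)
  | 0, _, cols => cols
  | _ + 1, [], cols => cols
  | fuel + 1, m :: rest, cols =>
    let idx := -m.2.1
    let s := -m.1
    if idx > v - k + s then loopB v k fuel rest cols
    else
      let cur1 := m.2.2.set idx.toNat 1
      if s + 1 = k then loopB v k fuel ((m.1, -(idx + 1), m.2.2) :: rest) (cols ++ [cur1])
      else loopB v k fuel ((m.1 - 1, -(idx + 1), cur1) :: (m.1, -(idx + 1), m.2.2) :: rest) cols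

lemma loopA_eq_loopB (v k : Int) : ∀ fuel : Nat,
    (∀ st cols, st.Pairwise keyLt → loopA v k fuel st cols = loopB v k fuel st cols) ∧
    (∀ a b t cols, keyLt a b → (b :: t).Pairwise keyLt → (∀ y ∈ t, keyLt a y) →
      loopA v k fuel (b :: a :: t) cols = loopB v k fuel (a :: b :: t) cols) := by
  intro fuel
  induction fuel with
  | zero => exact ⟨fun st cols _ => rfl, fun a b t cols _ _ _ => rfl⟩
  | succ fuel ih =>
    obtain ⟨ih1, ih2⟩ := ih
    constructor
    · intro st cols hst
      cases st with
      | nil => rfl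
      | cons x xs =>
        rw [List.pairwise_cons] at hst
        obtain ⟨hx, hxs⟩ := hst
        have hpop : popMin x xs = (x, xs) :=
          popMin_min x xs (fun y hy => keyLt_ltT x y (hx y hy))
        simp only [loopA, loopB, hpop]
        split_ifs with hguard hk
        · exact ih1 xs cols hxs
        · refine ih1 _ _ ?_
          rw [List.pairwise_cons]
          refine ⟨fun y hy => ?_, hxs⟩
          have := hx y hy
          simp only [keyLt] at this ⊢
          omega
        · refine ih2 _ _ _ _ ?_ ?_ ?_
          · simp only [keyLt]; omega
          · rw [List.pairwise_cons]
            refine ⟨fun y hy => ?_, hxs⟩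
            have := hx y hy
            simp only [keyLt] at this ⊢
            omega
          · intro y hy
            have := hx y hy
            simp only [keyLt] at this ⊢
            omega
    · intro a b t cols hab hbt hat
      rw [List.pairwise_cons] at hbt
      obtain ⟨hb, ht⟩ := hbt
      have hpop : popMin b (a :: t) = (a, b :: t) :=
        popMin_second a b t (keyLt_ltT a b hab) (fun y hy => keyLt_ltT a y (hat y hy))
      simp only [loopA, loopB, hpop]
      split_ifs with hguard hk
      · refine ih1 _ _ ?_
        rw [List.pairwise_cons]
        exact ⟨hb, ht⟩
      · refine ih1 _ _ ?_
        rw [List.pairwise_cons]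
        refine ⟨fun y hy => ?_, by rw [List.pairwise_cons]; exact ⟨hb, ht⟩⟩
        rcases List.mem_cons.mp hy with h' | h'
        · subst h'
          simp only [keyLt] at hab ⊢
          omega
        · have := hat y h'
          simp only [keyLt] at this ⊢
          omega
      · refine ih2 _ _ _ _ ?_ ?_ ?_
        · simp only [keyLt]; omega
        · rw [List.pairwise_cons]
          refine ⟨fun y hy => ?_, by rw [List.pairwise_cons]; exact ⟨hb, ht⟩⟩
          rcases List.mem_cons.mp hy with h' | h'
          · subst h'
            simp only [keyLt] at hab ⊢
            omega
          · have := hat y h'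
            simp only [keyLt] at this ⊢
            omega
        · intro y hy
          rcases List.mem_cons.mp hy with h' | h'
          · subst h'
            simp only [keyLt] at hab ⊢
            omega
          · have := hat y h'
            simp only [keyLt] at this ⊢
            omega

-- lexicographic m-combinations of the integer interval [start, v)
def combs (v : Int) (start : Int) (m : Nat) : List (List Int) :=
  if m = 0 then [[]]
  else if v - start < (m : Int) then []
  else (combs v (start + 1) (m - 1)).map (fun r => start :: r) ++ combs v (start + 1) m
termination_by (v - start).toNat
decreasing_by all_goals (simp_all; omega)

lemma combs_zero (v p : Int) : combs v p 0 = [[]] := by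
  rw [combs]; simp

lemma combs_of_short (v p : Int) (m : Nat) (hm : m ≠ 0) (h : v - p < (m : Int)) :
    combs v p m = [] := by
  rw [combs]; simp [hm, h]

lemma combs_succ (v p : Int) (m : Nat) (hp : p < v) :
    combs v p (m + 1) = (combs v (p + 1) m).map (fun r => p :: r) ++ combs v (p + 1) (m + 1) := by
  rw [combs]
  simp only [Nat.add_sub_cancel, Nat.succ_ne_zero, if_false]
  by_cases hlt : v - p < ((m + 1 : Nat) : Int)
  · rw [if_pos hlt]
    have hm : m ≠ 0 := by push_cast at hlt; omega
    rw [combs_of_short v (p + 1) m hm (by push_cast at hlt ⊢; omega),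
        combs_of_short v (p + 1) (m + 1) (by simp) (by push_cast at hlt ⊢; omega)]
    simp
  · rw [if_neg hlt]

-- semantics of a frame: all completions, in the order A emits them
def semF (v k : Int) (fr : Int × Int × List Int) : List (List Int) :=
  (combs v (-fr.2.1) ((k + fr.1).toNat)).map
    (fun ps => ps.foldl (fun col p => col.set p.toNat 1) fr.2.2)

def costF (v : Int) (fr : Int × Int × List Int) : Nat := 3 ^ ((v + 1 + fr.2.1).toNat)

lemma loopB_sem (v k : Int) : ∀ (fuel : Nat) (frames : List (Int × Int × List Int))
    (cols : List (List Int)), (∀ fr ∈ frames, -fr.1 < k) →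
    (frames.map (costF v)).sum ≤ fuel →
    loopB v k fuel frames cols = cols ++ frames.flatMap (semF v k) := by
  intro fuel
  induction fuel with
  | zero =>
    intro frames cols hval hcost
    cases frames with
    | nil => simp [loopB]
    | cons m rest =>
      exfalso
      simp only [List.map_cons, List.sum_cons, costF] at hcost
      have h3 : 1 ≤ 3 ^ ((v + 1 + m.2.1).toNat) := Nat.one_le_pow _ _ (by norm_num)
      omega
  | succ fuel ih =>
    intro frames cols hval hcost
    cases frames with
    | nil => simp [loopB]
    | cons m rest =>
      obtain ⟨ns, ni, cur⟩ := m
      have hsk : -ns < k := hval (ns, ni, cur) (by simp)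
      simp only [List.map_cons, List.sum_cons, costF] at hcost
      have hone : (1 : Nat) ≤ 3 ^ ((v + ni).toNat) := Nat.one_le_pow _ _ (by norm_num)
      simp only [loopB]
      by_cases hguard : -ni > v - k + -ns
      · rw [if_pos hguard]
        have hc : 3 ^ ((v + 1 + ni).toNat) ≥ 1 := Nat.one_le_pow _ _ (by norm_num)
        rw [ih rest cols (fun fr h => hval fr (by simp [h])) (by omega)]
        have hsem : semF v k (ns, ni, cur) = [] := by
          unfold semF
          rw [combs_of_short v (-(ns, ni, cur).2.1) (((k : Int) + (ns, ni, cur).1).toNat)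
            (by simp; omega) (by simp; omega)]
          simp
        simp [hsem]
      · rw [if_neg hguard]
        have hiv : -ni < v := by omega
        have hexp : (v + 1 + ni).toNat = (v + ni).toNat + 1 := by omega
        have hpow : 3 ^ ((v + 1 + ni).toNat) = 3 ^ ((v + ni).toNat) * 3 := by
          rw [hexp, pow_succ]
        by_cases hk : -ns + 1 = k
        · rw [if_pos hk]
          rw [ih ((ns, -(-ni + 1), cur) :: rest) _
            (fun fr h => by
              rcases List.mem_cons.mp h with h' | h'
              · rw [h']; simpa using hsk
              · exact hval fr (by simp [h']))
            (by simp only [List.map_cons, List.sum_cons, costF]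
                rw [show (v + 1 + -(-ni + 1)).toNat = (v + ni).toNat from by omega]
                omega)]
          have hsem : semF v k (ns, ni, cur) =
              cur.set (-ni).toNat 1 :: semF v k (ns, -(-ni + 1), cur) := by
            unfold semF
            simp only [neg_neg]
            have hm0 : ((k : Int) + ns).toNat = 1 := by omega
            simp only [hm0]
            rw [show (1 : Nat) = 0 + 1 from rfl, combs_succ v (-ni) 0 hiv, combs_zero]
            simp [List.foldl_cons]
          simp only [List.flatMap_cons]
          rw [hsem]
          simp [List.append_assoc]
        · rw [if_neg hk]
          have hsk1 : -ns + 1 < k := by omega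
          rw [ih ((ns - 1, -(-ni + 1), cur.set (-ni).toNat 1) :: (ns, -(-ni + 1), cur) :: rest) _
            (fun fr h => by
              rcases List.mem_cons.mp h with h' | h'
              · rw [h']; simp; omega
              · rcases List.mem_cons.mp h' with h'' | h''
                · rw [h'']; simpa using hsk
                · exact hval fr (by simp [h'']))
            (by simp only [List.map_cons, List.sum_cons, costF]
                rw [show (v + 1 + -(-ni + 1)).toNat = (v + ni).toNat from by omega]
                omega)]
          have hsem : semF v k (ns, ni, cur) =
              semF v k (ns - 1, -(-ni + 1), cur.set (-ni).toNat 1) ++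
              semF v k (ns, -(-ni + 1), cur) := by
            unfold semF
            simp only [neg_neg]
            have hm0 : ((k : Int) + ns).toNat = ((k : Int) + ns - 1).toNat + 1 := by omega
            have hns : (k : Int) + (ns - 1) = k + ns - 1 := by ring
            rw [hm0, hns, combs_succ v (-ni) _ hiv, List.map_append, List.map_map]
            congr 1
          simp only [List.flatMap_cons]
          rw [hsem]
          simp [List.append_assoc]

-- the adjacent-pairs zip over a mapped range
lemma zipAdj {α : Type} (F : List (List Int) → List (List Int) → α) :
    ∀ (n : Nat) (g : Nat → List (List Int)),
    ((((List.range (n + 1)).map g).zip (((List.range (n + 1)).map g).tail)).map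
      (fun pc => F pc.1 pc.2)) = (List.range n).map (fun m => F (g m) (g (m + 1))) := by
  intro n
  induction n with
  | zero => intro g; simp [List.range_one]
  | succ n ih =>
    intro g
    rw [show List.range (n+1+1) = 0 :: List.map Nat.succ (List.range (n+1)) from List.range_succ_eq_map,
        show List.range (n+1) = 0 :: List.map Nat.succ (List.range n) from List.range_succ_eq_map]
    simp only [List.map_cons, List.map_map, List.tail_cons, List.zip_cons_cons]
    have h2 := ih (fun m => g (m + 1))
    rw [show List.range (n+1) = 0 :: List.map Nat.succ (List.range n) from List.range_succ_eq_map] at h2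
    simp only [List.map_cons, List.map_map, List.tail_cons, Function.comp_def, Nat.succ_eq_add_one] at h2 ⊢
    rw [h2]

lemma tbl (v : Int) (k' : Nat) : ∀ (n : Nat) (p : Int), v = p + (n : Int) →
    (PySem.List.pyRange p v 1).foldr
      (fun q C => C.take 1 ++ (C.zip C.tail).map (fun pc => pc.1.map (fun c => q :: c) ++ pc.2))
      ([[([] : List Int)]] ++ List.replicate k' []) =
    (List.range (k' + 1)).map (fun m => combs v p m) := by
  intro n
  induction n with
  | zero =>
    intro p hp
    rw [PySem.List.pyRange_one_eq_nil (by omega)]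
    simp only [List.foldr_nil]
    rw [show List.range (k' + 1) = 0 :: List.map Nat.succ (List.range k') from List.range_succ_eq_map]
    simp only [List.map_cons, List.map_map, Function.comp_def, Nat.succ_eq_add_one, combs_zero]
    rw [List.map_congr_left (fun m _ => combs_of_short v p (m + 1) (by simp) (by push_cast; omega)),
        List.map_const', List.length_range]
    rfl
  | succ n ih =>
    intro p hp
    have hplt : p < v := by push_cast at hp; omega
    rw [PySem.List.pyRange_one_cons hplt]
    simp only [List.foldr_cons]
    rw [ih (p + 1) (by push_cast at hp ⊢; omega)]
    have hz := zipAdj (fun A B => A.map (fun c => p :: c) ++ B) k' (fun m => combs v (p + 1) m)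
    simp only [] at hz
    rw [hz]
    rw [show List.range (k' + 1) = 0 :: List.map Nat.succ (List.range k') from List.range_succ_eq_map]
    simp only [List.map_cons, List.map_map, Function.comp_def, Nat.succ_eq_add_one, combs_zero,
      List.take_succ_cons, List.take_zero]
    rw [List.map_congr_left (fun m _ => (combs_succ v p m hplt).symm)]
    rfl

lemma loopA_nil (v k : Int) (fuel : Nat) (cols : List (List Int)) :
    loopA v k fuel [] cols = cols := by
  cases fuel <;> rfl

-- ===== VERDICT (by name: the statement is the Claim_ definition above) =====
theorem compute_IM_columns_spec : Claim_equal_compute_IM_columns := by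
  intro v k _ hpre
  unfold Spec_compute_IM_columns
  unfold Pre_compute_IM_columns at hpre
  by_cases hvk : v < k
  · -- A prunes the initial frame immediately; B's guard returns []
    unfold compute_IM_columns compute_IM_columns_alt
    rw [if_pos (Or.inr hvk)]
    simp only [loopA, popMin]
    rw [if_pos (by simp; omega)]
    exact loopA_nil v k _ []
  · have h1v : 1 ≤ v := by omega
    have h1k : 1 ≤ k := by omega
    have hkv : k ≤ v := by omega
    unfold compute_IM_columns compute_IM_columns_alt
    rw [if_neg (by omega)]
    have hAB := (loopA_eq_loopB v k (3 ^ (v + 1).toNat + 1)).1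
      [((0 : Int), (0 : Int), List.replicate v.toNat 0)] [] (by simp)
    rw [hAB]
    rw [loopB_sem v k _ _ [] (by simp; omega)
      (by simp only [List.map_cons, List.map_nil, List.sum_cons, List.sum_nil, costF, add_zero]
          omega)]
    have ht := tbl v k.toNat v.toNat 0 (by omega)
    simp only [] at ht
    rw [List.foldl_reverse]
    rw [ht]
    rw [show k = ((k.toNat : Nat) : Int) from (Int.toNat_of_nonneg (by omega)).symm,
      PySem.List.pyGet?_natCast]
    simp only [List.getElem?_map]
    simp [semF, List.flatMap_cons]
    congr 2
    congr 1
    omega
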